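-- pv_equiv track=rewrite | github.com/IngeRi92/python-study-progress | 1. Sissejuhatus/7. Sõne/Boonus/capitalize_letters.py | capitalize_letters
-- ===== SOURCE A (Python) =====
-- def capitalize_letters(text: str) -> str:
--     """
--     If a letter is present in given string in both lowercase and uppercase, capitalize all occurrences of the letter.
--
--     Examples:
--     capitalize_letters("") -> ""
--     capitalize_letters("abbA") -> "AbbA"
--     capitalize_letters("abBa") -> "aBBa"
--     capitalize_letters("AbBa") -> "ABBA"
--     capitalize_letters("AbbA") -> "AbbA
--     capitalize_letters("abba") -> "abba"
--     capitalize_letters("ABBA") -> "ABBA"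
--
--     :param text: given text
--     :return: capitalized text
--     """
--     if not text:
--         return text
--
--     result = ""
--     for char in text:
--         if char.lower() in text and char.upper() in text:
--             result += char.upper()
--         else:
--             result += char
--     return result
-- ===== SOURCE B (Python) =====
-- def capitalize_letters(text: str) -> str:
--     seen = set(text)
--     dual = {c for c in seen if c.isalpha() and c.swapcase() in seen}
--     return text.translate({ord(c): ord(c.upper()) for c in dual})
-- ===== Notes on version B (the rewrite author's own statement) =====
-- stated objective: faster
-- what changed: A rescans the whole string twice per occurrence and grows the result by repeated concatenation; B instead builds the set of present characters, forms the subset of letters whose swapcase is also present (a set-intersection rule equivalent to A's both-cases substring tests on the ASCII domain), and applies it in one pass via str.translate.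
import Mathlib
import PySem

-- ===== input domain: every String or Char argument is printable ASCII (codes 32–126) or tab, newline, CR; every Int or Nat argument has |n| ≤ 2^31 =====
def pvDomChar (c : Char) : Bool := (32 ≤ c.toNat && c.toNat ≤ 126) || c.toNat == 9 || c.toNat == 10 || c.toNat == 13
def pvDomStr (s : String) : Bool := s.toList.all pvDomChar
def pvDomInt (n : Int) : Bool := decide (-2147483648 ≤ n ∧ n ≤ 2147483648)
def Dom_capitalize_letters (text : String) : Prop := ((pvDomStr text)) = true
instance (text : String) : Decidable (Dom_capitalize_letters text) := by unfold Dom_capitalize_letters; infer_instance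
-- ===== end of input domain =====

-- B replaces the per-occurrence pair of substring scans by a set-intersection rule (a letter is
-- capitalized iff its swapcase lies in the set of present characters) applied via a translate table
-- (objective: faster).

-- ===== PORT A =====
def capitalize_letters (text : String) : String :=
  let cs := text.toList
  if cs = [] then text
  else
    String.ofList (cs.foldl (fun res c =>
      if PySem.Chars.isIn [PySem.Chars.lowerChar c] cs && PySem.Chars.isIn [PySem.Chars.upperChar c] cs
      then res ++ [PySem.Chars.upperChar c]
      else res ++ [c]) [])

-- ===== PORT B =====
-- Python's str.swapcase, exact on the ASCII domain (case mapping is the ASCII one there).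
def pvSwapcase (c : Char) : Char :=
  if PySem.Chars.islower c then PySem.Chars.upperChar c
  else if PySem.Chars.isupper c then PySem.Chars.lowerChar c
  else c

def capitalize_letters_alt (text : String) : String :=
  let cs := text.toList
  let seen : PySem.Set Char := PySem.Set.ofList cs
  let dual : List Char :=
    seen.filter (fun c => PySem.Chars.isalpha c && seen.contains (pvSwapcase c))
  -- str.translate with a single-char-to-single-char table: map each char through the table, default itself
  let table : PySem.Dict Char Char :=
    dual.foldl (fun d c => d.insert c (PySem.Chars.upperChar c)) PySem.Dict.empty
  String.ofList (cs.map (fun c => table.getD c c))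

-- ===== PRECONDITION & SPEC =====
def Spec_capitalize_letters (text : String) (out : String) : Prop := out = capitalize_letters_alt text
instance (text : String) (out : String) : Decidable (Spec_capitalize_letters text out) := by unfold Spec_capitalize_letters; infer_instance

-- ===== CLAIM (what is proved, stated in full; the proofs are below) =====
def Claim_equal_capitalize_letters : Prop := ∀ (text : String), Dom_capitalize_letters text → Spec_capitalize_letters text (capitalize_letters text)

-- ===== LEMMAS AND PROOFS =====

lemma isIn_singleton (x : Char) (s : List Char) : PySem.Chars.isIn [x] s = true ↔ x ∈ s := by
  rw [PySem.Chars.isIn_iff_infix]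
  constructor
  · intro h; exact h.mem (List.mem_singleton_self x)
  · intro h
    obtain ⟨l, r, rfl⟩ := List.append_of_mem h
    exact ⟨l, r, by simp⟩

-- A's accumulating loop, in closed form
lemma foldl_append_ite (cond : Char → Bool) (u : Char → Char) (l acc : List Char) :
    l.foldl (fun res c => if cond c then res ++ [u c] else res ++ [c]) acc
      = acc ++ l.map (fun c => if cond c then u c else c) := by
  induction l generalizing acc with
  | nil => simp
  | cons c l ih => by_cases h : cond c <;> simp [h, ih]

-- a dict built by inserting (c, f c) for each key c answers f c on inserted keys
lemma getD_foldl_insert_fn (f : Char → Char) (ks : List Char) (d : PySem.Dict Char Char)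
    (x : Char) (dflt : Char) :
    (ks.foldl (fun d c => d.insert c (f c)) d).getD x dflt
      = if x ∈ ks then f x else d.getD x dflt := by
  induction ks generalizing d with
  | nil => simp
  | cons k ks ih =>
    simp only [List.foldl_cons, ih, List.mem_cons]
    by_cases hx : x ∈ ks
    · simp [hx]
    · by_cases hk : x = k
      · simp [hk, PySem.Dict.getD_insert_self]
      · simp [hx, hk, PySem.Dict.getD_insert]

lemma not_isupper_of_islower (c : Char) (h : PySem.Chars.islower c = true) :
    PySem.Chars.isupper c = false := by
  simp only [PySem.Chars.islower, Bool.and_eq_true, decide_eq_true_eq, Char.le_def,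
    UInt32.le_iff_toNat_le] at h
  have ha : ('a' : Char).val.toNat = 97 := by decide
  have hZ : ('Z' : Char).val.toNat = 90 := by decide
  simp only [PySem.Chars.isupper, Char.le_def, UInt32.le_iff_toNat_le, Bool.and_eq_false_iff,
    decide_eq_false_iff_not]
  right; omega

-- per-character agreement: A's both-cases-substring rule equals B's swapcase-in-seen rule
lemma per_char (cs : List Char) (c : Char) (hc : c ∈ cs) :
    (if PySem.Chars.isIn [PySem.Chars.lowerChar c] cs && PySem.Chars.isIn [PySem.Chars.upperChar c] cs
     then PySem.Chars.upperChar c else c)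
      = (if PySem.Chars.isalpha c && (PySem.Set.ofList cs).contains (pvSwapcase c)
         then PySem.Chars.upperChar c else c) := by
  by_cases hl : PySem.Chars.islower c
  · have hu : PySem.Chars.isupper c = false := not_isupper_of_islower c hl
    have h1 : PySem.Chars.lowerChar c = c := by simp [PySem.Chars.lowerChar, hu]
    simp only [pvSwapcase, PySem.Chars.isalpha, hl, hu, if_true, Bool.false_or, Bool.true_and]
    rw [h1]
    simp [isIn_singleton, PySem.Set.mem_ofList, hc]
  · by_cases hu : PySem.Chars.isupper c
    · -- c is uppercase: A's result on c is upperChar c = c either way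
      have h1 : PySem.Chars.upperChar c = c := by simp [PySem.Chars.upperChar, hl]
      rw [h1]; simp
    · -- not a letter: lowerChar c = upperChar c = c, A's condition holds, both sides are c
      have h1 : PySem.Chars.lowerChar c = c := by simp [PySem.Chars.lowerChar, hu]
      have h2 : PySem.Chars.upperChar c = c := by simp [PySem.Chars.upperChar, hl]
      simp [PySem.Chars.isalpha, hl, hu, h1, h2, isIn_singleton, hc]

-- ===== VERDICT (by name: the statement is the Claim_ definition above) =====
theorem capitalize_letters_spec : Claim_equal_capitalize_letters := by
  intro text _
  unfold Spec_capitalize_letters capitalize_letters capitalize_letters_alt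
  set cs := text.toList with hcs
  by_cases h : cs = []
  · simp_all
  · simp only [h, if_false, foldl_append_ite, List.nil_append, getD_foldl_insert_fn]
    refine congrArg String.ofList (List.map_congr_left fun c hc => ?_)
    rw [per_char cs c hc]
    simp [List.mem_filter, PySem.Set.mem_ofList, hc]
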